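-- pv_equiv track=rewrite | github.com/hydra-genetics/biomarker | workflow/scripts/hrd.py | count_TAI_score
-- ===== SOURCE A (Python) =====
-- def count_TAI_score(filtered_merged_segments):
--     TAI_score = 0
--     for chrom in filtered_merged_segments:
--         nr_segments = 0
--         nr_TAI_segments = 0
--         i = 0
--         last_segment = len(filtered_merged_segments[chrom]) - 1
--         for segment in filtered_merged_segments[chrom]:
--             nr_segments += 1
--             if (
--                 (segment["cn"] != 2 or (segment["cn"] == 2 and segment["cn1"] != segment["cn2"]))
--                 and (i == 0 or i == last_segment)
--             ):
--                 nr_TAI_segments += 1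
--             i += 1
--         '''No TAI_score for CNV of entire chromosome'''
--         if nr_segments > 2 or (nr_segments == 2 and nr_TAI_segments == 1):
--             TAI_score += nr_TAI_segments
--     return TAI_score
-- ===== SOURCE B (Python) =====
-- def count_TAI_score(filtered_merged_segments):
--     total = 0
--     for segs in filtered_merged_segments.values():
--         n = len(segs)
--         if n == 0:
--             continue
--         def abnormal(seg):
--             return seg["cn"] != 2 or seg["cn1"] != seg["cn2"]
--         nr_TAI = (1 if abnormal(segs[0]) else 0) + (
--             (1 if abnormal(segs[-1]) else 0) if n >= 2 else 0
--         )
--         if n > 2 or (n == 2 and nr_TAI == 1):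
--             total += nr_TAI
--     return total
-- ===== Notes on version B (the rewrite author's own statement) =====
-- stated objective: simpler
-- what changed: B drops the per-segment counting loop with its running index and last-segment comparison, and instead inspects only the two endpoint segments segs[0] and segs[-1] directly (middle segments can never contribute), iterating dict values instead of re-looking up each key.
import Mathlib
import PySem

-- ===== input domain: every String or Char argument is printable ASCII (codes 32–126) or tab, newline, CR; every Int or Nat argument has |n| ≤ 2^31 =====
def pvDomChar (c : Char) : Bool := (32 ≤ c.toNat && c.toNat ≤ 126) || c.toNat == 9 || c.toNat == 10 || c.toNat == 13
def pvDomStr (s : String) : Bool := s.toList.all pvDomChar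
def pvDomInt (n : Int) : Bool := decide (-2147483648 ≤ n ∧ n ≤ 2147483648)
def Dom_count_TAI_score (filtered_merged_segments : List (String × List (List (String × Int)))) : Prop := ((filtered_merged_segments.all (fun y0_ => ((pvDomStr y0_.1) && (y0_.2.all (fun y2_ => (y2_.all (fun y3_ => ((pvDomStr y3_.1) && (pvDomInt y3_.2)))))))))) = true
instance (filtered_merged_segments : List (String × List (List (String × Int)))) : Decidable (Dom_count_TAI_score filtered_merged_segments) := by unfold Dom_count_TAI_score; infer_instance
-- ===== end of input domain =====

-- B inspects only the two endpoint segments of each chromosome instead of scanning every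
-- segment with a running index; same gate, same total (objective: simpler).


-- ===== PORT A =====
-- segment["cn"] != 2 or (segment["cn"] == 2 and segment["cn1"] != segment["cn2"])
-- (getD 0 is a total stand-in for d[k]; Pre_ guarantees the keys are present where Python reads them)
def pvAbnA (seg : List (String × Int)) : Bool :=
  ((PySem.Dict.mk seg).getD "cn" 0 != 2) ||
    ((PySem.Dict.mk seg).getD "cn" 0 == 2 &&
      (PySem.Dict.mk seg).getD "cn1" 0 != (PySem.Dict.mk seg).getD "cn2" 0)

def count_TAI_score (filtered_merged_segments : List (String × List (List (String × Int)))) : Int :=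
  filtered_merged_segments.foldl (fun TAI_score p =>
    let chrom := p.1
    let segs := (PySem.Dict.mk filtered_merged_segments).getD chrom []
    let last_segment : Int := (segs.length : Int) - 1
    let st := segs.foldl (fun (s : Int × Int × Int) seg =>
        (s.1 + 1,
         (if pvAbnA seg && (s.2.2 == 0 || s.2.2 == last_segment) then s.2.1 + 1 else s.2.1),
         s.2.2 + 1)) (0, 0, 0)
    if st.1 > 2 ∨ (st.1 = 2 ∧ st.2.1 = 1) then TAI_score + st.2.1 else TAI_score) 0

-- ===== PORT B =====
-- seg["cn"] != 2 or seg["cn1"] != seg["cn2"]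
def pvAbnB (seg : List (String × Int)) : Bool :=
  ((PySem.Dict.mk seg).getD "cn" 0 != 2) ||
    ((PySem.Dict.mk seg).getD "cn1" 0 != (PySem.Dict.mk seg).getD "cn2" 0)

def count_TAI_score_alt (filtered_merged_segments : List (String × List (List (String × Int)))) : Int :=
  filtered_merged_segments.foldl (fun total p =>
    let segs := p.2
    let n : Int := segs.length
    if n == 0 then total
    else
      let nr_TAI : Int :=
        (if pvAbnB (PySem.List.pyGetD segs 0 []) then 1 else 0) +
          (if n ≥ 2 then (if pvAbnB (PySem.List.pyGetD segs (-1) []) then 1 else 0) else 0)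
      if n > 2 ∨ (n = 2 ∧ nr_TAI = 1) then total + nr_TAI else total) 0

-- ===== PRECONDITION & SPEC =====
-- Pre_ excludes (a) association lists with duplicate keys (outer or inside a segment), which no
-- Python dict can produce, and (b) segments missing a key A reads ("cn" always; "cn1"/"cn2" when
-- cn == 2), on which the Python A raises KeyError.
def Pre_count_TAI_score (filtered_merged_segments : List (String × List (List (String × Int)))) : Prop :=
  (filtered_merged_segments.map Prod.fst).Nodup ∧
  ∀ p ∈ filtered_merged_segments, ∀ seg ∈ p.2,
    (seg.map Prod.fst).Nodup ∧
    (PySem.Dict.mk seg).contains "cn" = true ∧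
    ((PySem.Dict.mk seg).getD "cn" 0 = 2 →
      (PySem.Dict.mk seg).contains "cn1" = true ∧ (PySem.Dict.mk seg).contains "cn2" = true)
instance (filtered_merged_segments : List (String × List (List (String × Int)))) : Decidable (Pre_count_TAI_score filtered_merged_segments) := by unfold Pre_count_TAI_score; infer_instance

def pvWitness_count_TAI_score : (List (String × List (List (String × Int)))) :=
  [("chr1", [[("cn", 3), ("cn1", 2), ("cn2", 1)], [("cn", 2), ("cn1", 1), ("cn2", 1)],
             [("cn", 2), ("cn1", 2), ("cn2", 0)]]),
   ("chr2", [[("cn", 2), ("cn1", 1), ("cn2", 1)], [("cn", 4), ("cn1", 2), ("cn2", 2)]])]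

def Spec_count_TAI_score (filtered_merged_segments : List (String × List (List (String × Int)))) (out : Int) : Prop := out = count_TAI_score_alt filtered_merged_segments
instance (filtered_merged_segments : List (String × List (List (String × Int)))) (out : Int) : Decidable (Spec_count_TAI_score filtered_merged_segments out) := by unfold Spec_count_TAI_score; infer_instance

-- ===== CLAIM (what is proved, stated in full; the proofs are below) =====
def Claim_equal_count_TAI_score : Prop := ∀ (filtered_merged_segments : List (String × List (List (String × Int)))), Dom_count_TAI_score filtered_merged_segments → Pre_count_TAI_score filtered_merged_segments → Spec_count_TAI_score filtered_merged_segments (count_TAI_score filtered_merged_segments)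

-- ===== LEMMAS AND PROOFS =====

-- the two "abnormal" tests agree (boolean identity: a≠2 ∨ (a=2 ∧ x) ↔ a≠2 ∨ x)
theorem pvAbn_eq (seg : List (String × Int)) : pvAbnA seg = pvAbnB seg := by
  simp only [pvAbnA, pvAbnB, bne]
  cases h : (PySem.Dict.mk seg).getD "cn" 0 == 2 <;> simp_all

-- first-match lookup returns a pair's own value when keys are unique
theorem pvLookup_self {β : Type} (fms : List (String × β)) (d : β)
    (hnd : (fms.map Prod.fst).Nodup) : ∀ p ∈ fms, (PySem.Dict.mk fms).getD p.1 d = p.2 := by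
  induction fms with
  | nil => simp
  | cons q rest ih =>
    obtain ⟨k, v⟩ := q
    intro p hp
    simp only [List.map_cons, List.nodup_cons] at hnd
    rcases List.mem_cons.mp hp with h | h
    · subst h
      simp [PySem.Dict.getD, PySem.Dict.get?_mk_cons]
    · have hne : (k == p.1) = false := by
        simp only [beq_eq_false_iff_ne, ne_eq]
        intro he
        exact hnd.1 (he ▸ List.mem_map_of_mem h)
      simp only [PySem.Dict.getD, PySem.Dict.get?_mk_cons, hne, Bool.false_eq_true, if_false]
      exact ih hnd.2 p h

-- A's inner fold past index 0: only the last index can still contribute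
theorem pvFoldTail (last : Int) :
    ∀ (rest : List (List (String × Int))) (x : List (String × Int)) (ns nt i : Int),
      1 ≤ i → i + (rest.length : Int) = last →
      (x :: rest).foldl (fun (s : Int × Int × Int) seg =>
          (s.1 + 1,
           (if pvAbnA seg && (s.2.2 == 0 || s.2.2 == last) then s.2.1 + 1 else s.2.1),
           s.2.2 + 1)) (ns, nt, i)
      = (ns + 1 + rest.length, nt + (if pvAbnA ((x :: rest).getLast (by simp)) then 1 else 0),
         i + 1 + rest.length) := by
  intro rest
  induction rest with
  | nil =>
    intro x ns nt i h1 h2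
    simp only [List.length_nil, Nat.cast_zero, add_zero] at h2
    have hl : (i == last) = true := by simp [h2]
    simp only [List.foldl_cons, List.foldl_nil, List.length_nil, Nat.cast_zero, add_zero,
      List.getLast_singleton, hl, Bool.or_true, Bool.and_true]
    refine Prod.ext (by ring) (Prod.ext ?_ (by ring))
    split <;> ring
  | cons y rest ih =>
    intro x ns nt i h1 h2
    have h0 : (i == 0) = false := by simp only [beq_eq_false_iff_ne]; omega
    have hl : (i == last) = false := by
      simp only [beq_eq_false_iff_ne]
      simp only [List.length_cons] at h2
      push_cast at h2 ⊢
      omega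
    have step : (x :: y :: rest).foldl (fun (s : Int × Int × Int) seg =>
          (s.1 + 1,
           (if pvAbnA seg && (s.2.2 == 0 || s.2.2 == last) then s.2.1 + 1 else s.2.1),
           s.2.2 + 1)) (ns, nt, i)
        = (y :: rest).foldl (fun (s : Int × Int × Int) seg =>
          (s.1 + 1,
           (if pvAbnA seg && (s.2.2 == 0 || s.2.2 == last) then s.2.1 + 1 else s.2.1),
           s.2.2 + 1)) (ns + 1, nt, i + 1) := by
      simp only [List.foldl_cons, h0, hl, Bool.or_self, Bool.and_false, Bool.false_eq_true,
        if_false]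
    rw [step, ih y (ns + 1) nt (i + 1) (by omega) (by simp only [List.length_cons] at h2 ⊢; push_cast at h2 ⊢; omega)]
    have hgl : (x :: y :: rest).getLast (by simp) = (y :: rest).getLast (by simp) := rfl
    rw [hgl]
    refine Prod.ext (by simp only [List.length_cons]; push_cast; ring) (Prod.ext rfl (by simp only [List.length_cons]; push_cast; ring))

-- per-chromosome agreement
theorem pvChrom (segs : List (List (String × Int))) (TAI : Int) :
    (let last_segment : Int := (segs.length : Int) - 1
     let st := segs.foldl (fun (s : Int × Int × Int) seg =>
        (s.1 + 1,
         (if pvAbnA seg && (s.2.2 == 0 || s.2.2 == last_segment) then s.2.1 + 1 else s.2.1),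
         s.2.2 + 1)) (0, 0, 0)
     if st.1 > 2 ∨ (st.1 = 2 ∧ st.2.1 = 1) then TAI + st.2.1 else TAI)
    = (let n : Int := segs.length
       if n == 0 then TAI
       else
         let nr_TAI : Int :=
           (if pvAbnB (PySem.List.pyGetD segs 0 []) then 1 else 0) +
             (if n ≥ 2 then (if pvAbnB (PySem.List.pyGetD segs (-1) []) then 1 else 0) else 0)
         if n > 2 ∨ (n = 2 ∧ nr_TAI = 1) then TAI + nr_TAI else TAI) := by
  cases segs with
  | nil => norm_num [List.foldl_nil]
  | cons x rest =>
    cases rest with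
    | nil =>
      norm_num [List.foldl_cons, List.foldl_nil]
    | cons y rest' =>
      dsimp only
      have hne : (x :: y :: rest') ≠ [] := by simp
      have hlast : (1 : Int) + (rest'.length : Int) = ((x :: y :: rest').length : Int) - 1 := by
        simp only [List.length_cons]; push_cast; ring
      have hstep : (x :: y :: rest').foldl (fun (s : Int × Int × Int) seg =>
            (s.1 + 1,
             (if pvAbnA seg && (s.2.2 == 0 || s.2.2 == ((x :: y :: rest').length : Int) - 1)
              then s.2.1 + 1 else s.2.1),
             s.2.2 + 1)) (0, 0, 0)
          = (y :: rest').foldl (fun (s : Int × Int × Int) seg =>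
            (s.1 + 1,
             (if pvAbnA seg && (s.2.2 == 0 || s.2.2 == ((x :: y :: rest').length : Int) - 1)
              then s.2.1 + 1 else s.2.1),
             s.2.2 + 1)) (0 + 1, (if pvAbnA x then 0 + 1 else 0), 0 + 1) := by
        simp [List.foldl_cons]
      rw [hstep, pvFoldTail (((x :: y :: rest').length : Int) - 1) rest' y
        (0 + 1) (if pvAbnA x then 0 + 1 else 0) (0 + 1) (by norm_num)
        (by push_cast at hlast ⊢; omega)]
      have hget0 : PySem.List.pyGetD (x :: y :: rest') 0 [] = x := PySem.List.pyGetD_zero_cons x (y :: rest') []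
      have hgetl : PySem.List.pyGetD (x :: y :: rest') (-1) [] = (x :: y :: rest').getLast hne :=
        PySem.List.pyGetD_neg_one (x :: y :: rest') [] hne
      have hgl : (y :: rest').getLast (by simp) = (x :: y :: rest').getLast hne := rfl
      simp only [hget0, hgetl, hgl, ← pvAbn_eq]
      have hn0 : (((x :: y :: rest').length : Int) == 0) = false := by
        simp only [beq_eq_false_iff_ne, List.length_cons]; push_cast; omega
      have hn2 : (2 : Int) ≤ ((x :: y :: rest').length : Int) := by
        simp only [List.length_cons]; push_cast; omega
      have hcnt : (0 : Int) + 1 + 1 + (rest'.length : Int) = ((x :: y :: rest').length : Int) := by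
        simp only [List.length_cons]; push_cast; ring
      simp only [hn0, Bool.false_eq_true, if_false, if_pos hn2, hcnt]
      norm_num

-- ===== VERDICT (by name: the statement is the Claim_ definition above) =====
theorem count_TAI_score_spec : Claim_equal_count_TAI_score := by
  intro fms _ hpre
  unfold Spec_count_TAI_score count_TAI_score count_TAI_score_alt
  apply PySem.List.foldl_congr_mem
  intro acc p hp
  dsimp only
  rw [pvLookup_self fms [] hpre.1 p hp]
  exact pvChrom p.2 acc
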